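-- pv_equiv track=rewrite | github.com/themaxermister/ghc2020-practice-round | main.py | process
-- ===== SOURCE A (Python) =====
-- def process(max, menu):
--     results = []
--     current_slices = menu[0];
--     results.append(current_slices)
--     for index, slice_type in enumerate(menu):
--         if index > 0:
--             next_count = current_slices + slice_type
--             if next_count > max:
--                 return results, current_slices
--             else:
--                 results.append(slice_type)
--                 current_slices = next_count
-- ===== SOURCE B (Python) =====
-- def process(max, menu):
--     # Two-pass: build full prefix-sum table, then scan for the first crossing.
--     sums = []
--     total = 0
--     for x in menu:
--         total += x
--         sums.append(total)
--     if not sums: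
--         return None
--     prev = sums[0]
--     for i, s in enumerate(sums[1:], start=1):
--         if s > max:
--             return menu[:i], prev
--         prev = s
--     return None
-- ===== Notes on version B (the rewrite author's own statement) =====
-- stated objective: alternative
-- what changed: Replaces A's single-pass inline accumulation with early return by a two-pass prefix-sum table plus a separate threshold scan that reconstructs the result as menu[:i] and sums[i-1].
import Mathlib
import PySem

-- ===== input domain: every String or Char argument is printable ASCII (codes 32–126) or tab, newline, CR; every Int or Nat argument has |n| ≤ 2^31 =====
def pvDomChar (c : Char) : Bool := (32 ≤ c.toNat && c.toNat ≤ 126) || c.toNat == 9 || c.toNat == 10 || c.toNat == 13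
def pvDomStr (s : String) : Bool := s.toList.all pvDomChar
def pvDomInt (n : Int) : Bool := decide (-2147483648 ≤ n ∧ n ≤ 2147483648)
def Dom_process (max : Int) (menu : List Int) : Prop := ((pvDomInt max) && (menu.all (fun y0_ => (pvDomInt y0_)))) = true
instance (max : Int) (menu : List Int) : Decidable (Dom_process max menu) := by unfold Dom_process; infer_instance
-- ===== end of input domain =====

-- B replaces A's single-pass inline accumulation by a prefix-sum table plus a separate
-- threshold scan (alternative decomposition, same cost); equivalence is about the return value.

-- ===== PORT A =====
-- A's for-loop over menu with index > 0, i.e. over the tail, carrying results and current_slices.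
def processLoop (max : Int) (results : List Int) (cur : Int) : List Int → Option (List Int × Int)
  | [] => none
  | x :: rest =>
      let nc := cur + x
      if nc > max then some (results, cur)
      else processLoop max (results ++ [x]) nc rest

def process (max : Int) (menu : List Int) : Option (List Int × Int) :=
  match menu with
  | [] => none  -- Python raises IndexError at menu[0]; excluded by Pre_process
  | h :: t => processLoop max ([] ++ [h]) h t

-- ===== PORT B =====
-- second loop of Source B: for i, s in enumerate(sums[1:], 1): if s > max: return menu[:i], prev
def altScan (max : Int) (menu : List Int) (i : Nat) (prev : Int) : List Int → Option (List Int × Int)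
  | [] => none
  | s :: ss => if s > max then some (menu.take i, prev) else altScan max menu (i + 1) s ss

def process_alt (max : Int) (menu : List Int) : Option (List Int × Int) :=
  -- first loop of Source B: build the prefix-sum table
  let sums := (menu.foldl (fun (acc : List Int × Int) x => (acc.1 ++ [acc.2 + x], acc.2 + x)) ([], 0)).1
  match sums with
  | [] => none
  | s0 :: rest => altScan max menu 1 s0 rest

-- ===== PRECONDITION & SPEC =====
-- Pre_ excludes only the empty menu, where the Python A raises IndexError (menu[0]).
def Pre_process (max : Int) (menu : List Int) : Prop := menu ≠ []
instance (max : Int) (menu : List Int) : Decidable (Pre_process max menu) := by unfold Pre_process; infer_instance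
def pvWitness_process : Int × List Int := (10, [3, 4, 5])

def Spec_process (max : Int) (menu : List Int) (out : Option (List Int × Int)) : Prop := out = process_alt max menu
instance (max : Int) (menu : List Int) (out : Option (List Int × Int)) : Decidable (Spec_process max menu out) := by unfold Spec_process; infer_instance

-- ===== CLAIM (what is proved, stated in full; the proofs are below) =====
def Claim_equal_process : Prop := ∀ (max : Int) (menu : List Int), Dom_process max menu → Pre_process max menu → Spec_process max menu (process max menu)

-- ===== LEMMAS AND PROOFS =====

-- prefix sums starting from a running total
def prefixFrom (t : Int) : List Int → List Int
  | [] => []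
  | x :: xs => (t + x) :: prefixFrom (t + x) xs

theorem foldl_sums (menu : List Int) : ∀ (acc : List Int) (t : Int),
    menu.foldl (fun (acc : List Int × Int) x => (acc.1 ++ [acc.2 + x], acc.2 + x)) (acc, t)
      = (acc ++ prefixFrom t menu, t + menu.sum) := by
  induction menu with
  | nil => intro acc t; simp [prefixFrom]
  | cons x xs ih =>
      intro acc t
      simp only [List.foldl_cons, prefixFrom, List.sum_cons]
      rw [ih]
      simp
      ring

theorem loop_eq (max : Int) (menu : List Int) : ∀ (rest : List Int) (i : Nat) (cur : Int),
    menu.drop i = rest →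
    processLoop max (menu.take i) cur rest = altScan max menu i cur (prefixFrom cur rest) := by
  intro rest
  induction rest with
  | nil => intro i cur _; simp [processLoop, prefixFrom, altScan]
  | cons x xs ih =>
      intro i cur hdrop
      simp only [processLoop, prefixFrom, altScan]
      by_cases h : cur + x > max
      · simp [h]
      · simp only [h, if_false]
        have hx : menu[i]? = some x := by
          have := List.head?_drop (l := menu) (i := i)
          rw [hdrop] at this
          simpa using this.symm
        have htake : menu.take (i + 1) = menu.take i ++ [x] := by
          rw [List.take_add_one, hx]; rfl
        have hdrop' : menu.drop (i + 1) = xs := by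
          have : menu.drop (i + 1) = (menu.drop i).drop 1 := by
            rw [List.drop_drop]
          rw [this, hdrop]; rfl
        rw [← htake]
        exact ih (i + 1) (cur + x) hdrop'

-- ===== VERDICT (by name: the statement is the Claim_ definition above) =====
theorem process_spec : Claim_equal_process := by
  intro max menu _ hpre
  unfold Spec_process process process_alt
  match menu with
  | [] => exact absurd rfl hpre
  | h :: t =>
      simp only [foldl_sums, prefixFrom]
      have h0 : (0 : Int) + h = h := by ring
      rw [h0]
      have := loop_eq max (h :: t) t 1 h (by rfl)
      simpa using this
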